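-- pv_equiv track=rewrite | github.com/wherby/code | algorithm/array/子序列循环有序判断.py | sortableIntegers
-- ===== SOURCE A (Python) =====
-- from collections import Counter
--
-- def sortableIntegers(nums: list[int]) -> int:
--     n =len(nums)
--     ans = 0
--     sortedLs= sorted(nums)
--     def check(k):
--         for i in range(0,n,k):
--             sub = nums[i:i+k]
--             tar = sortedLs[i:i+k]
--             if Counter(sub) != Counter(tar):
--                 return False
--             d_c = 0
--             for i in range(k-1):
--                 if sub[i]>sub[i+1]:
--                     if sub[i] == tar[-1] and sub[i+1] == tar[0] and sub[-1]<=sub[0]: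
--                         d_c +=1
--                     else:
--                         return False
--             if d_c>1:
--                 return False
--         return True
--
--
--     for i in range(1,n+1):
--         if n%i == 0:
--             if check(i):
--                 ans +=i
--     return ans
-- ===== SOURCE B (Python) =====
-- def sortableIntegers(nums: list[int]) -> int:
--     n = len(nums)
--     sortedLs = sorted(nums)
--     ans = 0
--     for k in range(1, n + 1):
--         if n % k:
--             continue
--         ok = True
--         for i in range(0, n, k):
--             sub = nums[i:i + k]
--             tar = sortedLs[i:i + k]
--             doubled = tar + tar
--             if not any(doubled[j:j + k] == sub for j in range(k)):
--                 ok = False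
--                 break
--         if ok:
--             ans += k
--     return ans
-- ===== Notes on version B (the rewrite author's own statement) =====
-- stated objective: alternative
-- what changed: Per block, A compares Counters and counts descents with a three-way wrap condition; B instead decides validity by searching for the block as a contiguous length-k window of the doubled sorted block (cyclic-rotation test), keeping the outer divisor loop.
import Mathlib
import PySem

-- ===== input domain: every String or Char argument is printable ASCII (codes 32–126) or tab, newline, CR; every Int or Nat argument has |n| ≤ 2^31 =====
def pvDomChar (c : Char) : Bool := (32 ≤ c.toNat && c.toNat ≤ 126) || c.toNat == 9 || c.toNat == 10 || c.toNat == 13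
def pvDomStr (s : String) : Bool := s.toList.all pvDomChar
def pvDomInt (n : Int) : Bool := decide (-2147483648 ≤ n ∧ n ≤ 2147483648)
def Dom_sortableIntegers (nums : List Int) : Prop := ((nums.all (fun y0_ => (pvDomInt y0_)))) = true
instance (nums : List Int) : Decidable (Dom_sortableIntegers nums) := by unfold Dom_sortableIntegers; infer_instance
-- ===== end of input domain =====

-- B replaces A's Counter-equality-plus-descent-count block test by a cyclic-rotation window
-- search over the doubled sorted block (objective: alternative algorithm, same exact values).

-- ===== PORT A =====
-- Python 'Counter(sub) != Counter(tar)': dict equality = same key set and same value per key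
def pyDictEq (d e : PySem.Dict Int Int) : Bool :=
  PySem.Set.equal d.keys e.keys && d.keys.all (fun x => d.getD x 0 == e.getD x 0)

-- the inner 'for i in range(k-1)' loop of check: returns none on 'return False', else the final d_c
def checkInnerA (sub tar : List Int) (dc : Int) : List Int → Option Int
  | [] => some dc
  | i :: rest =>
    if PySem.List.pyGetD sub (i+1) 0 < PySem.List.pyGetD sub i 0 then
      if PySem.List.pyGetD sub i 0 == PySem.List.pyGetD tar (-1) 0
          && PySem.List.pyGetD sub (i+1) 0 == PySem.List.pyGetD tar 0 0
          && decide (PySem.List.pyGetD sub (-1) 0 ≤ PySem.List.pyGetD sub 0 0) then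
        checkInnerA sub tar (dc+1) rest
      else none
    else checkInnerA sub tar dc rest

-- the outer 'for i in range(0,n,k)' loop of check, with its early 'return False's
def checkBlocksA (nums sortedLs : List Int) (k : Int) : List Int → Bool
  | [] => true
  | i :: rest =>
    let sub := PySem.List.slice nums (some i) (some (i+k))
    let tar := PySem.List.slice sortedLs (some i) (some (i+k))
    if !(pyDictEq (PySem.Dict.counter sub) (PySem.Dict.counter tar)) then false
    else
      match checkInnerA sub tar 0 (PySem.List.pyRange 0 (k-1) 1) with
      | none => false
      | some dc => if 1 < dc then false else checkBlocksA nums sortedLs k rest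

def sortableIntegers (nums : List Int) : Int :=
  let n : Int := PySem.List.len nums
  let sortedLs := PySem.List.sorted nums (fun x => x) false
  (PySem.List.pyRange 1 (n+1) 1).foldl
    (fun ans i =>
      if PySem.Int.mod n i == 0 then
        if checkBlocksA nums sortedLs i (PySem.List.pyRange 0 n i) then ans + i else ans
      else ans) 0

-- ===== PORT B =====
-- 'any(doubled[j:j+k] == sub for j in range(k))'
def rotOkB (sub tar : List Int) (k : Int) : Bool :=
  (PySem.List.pyRange 0 k 1).any
    (fun j => PySem.List.slice (tar ++ tar) (some j) (some (j+k)) == sub)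

-- the 'for i in range(0, n, k)' loop with the ok flag and break
def blocksOkB (nums sortedLs : List Int) (k : Int) : Bool :=
  (PySem.List.pyRange 0 (PySem.List.len nums) k).all (fun i =>
    rotOkB (PySem.List.slice nums (some i) (some (i+k)))
           (PySem.List.slice sortedLs (some i) (some (i+k))) k)

def sortableIntegers_alt (nums : List Int) : Int :=
  let n : Int := PySem.List.len nums
  let sortedLs := PySem.List.sorted nums (fun x => x) false
  (PySem.List.pyRange 1 (n+1) 1).foldl
    (fun ans k =>
      if PySem.Int.mod n k != 0 then ans
      else if blocksOkB nums sortedLs k then ans + k else ans) 0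

-- ===== PRECONDITION & SPEC =====
def Spec_sortableIntegers (nums : List Int) (out : Int) : Prop := out = sortableIntegers_alt nums
instance (nums : List Int) (out : Int) : Decidable (Spec_sortableIntegers nums out) := by unfold Spec_sortableIntegers; infer_instance

-- ===== CLAIM (what is proved, stated in full; the proofs are below) =====
def Claim_equal_sortableIntegers : Prop := ∀ (nums : List Int), Dom_sortableIntegers nums → Spec_sortableIntegers nums (sortableIntegers nums)

-- ===== LEMMAS AND PROOFS =====

-- total indexing shorthand used by the equivalence argument
def gd (l : List Int) (i : Nat) : Int := l.getD i 0

-- the three wrap conditions A tests at a descent, and the descent itself, over Nat indices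
def okP (sub tar : List Int) (i : Nat) : Prop :=
  gd sub (i+1) < gd sub i →
    (gd sub i = gd tar (tar.length-1) ∧ gd sub (i+1) = gd tar 0 ∧
     gd sub (sub.length-1) ≤ gd sub 0)

def descB (sub : List Int) (i : Nat) : Bool := decide (gd sub (i+1) < gd sub i)

-- A's per-block acceptance, as a proposition
def blockPassA (sub tar : List Int) : Prop :=
  sub.Perm tar ∧ (∀ i, i < tar.length - 1 → okP sub tar i) ∧
    (List.range (tar.length - 1)).countP (descB sub) ≤ 1

def okB (sub tar : List Int) (i : Nat) : Bool :=
  !(descB sub i) || (decide (gd sub i = gd tar (tar.length-1))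
    && decide (gd sub (i+1) = gd tar 0) && decide (gd sub (sub.length-1) ≤ gd sub 0))

theorem okB_iff (sub tar : List Int) (i : Nat) :
    okB sub tar i = true ↔ okP sub tar i := by
  simp only [okB, Bool.or_eq_true, Bool.not_eq_true', descB, decide_eq_false_iff_not,
    Bool.and_eq_true, decide_eq_true_eq, okP]
  tauto

theorem all_congr_mem {α : Type} {l : List α} {f g : α → Bool}
    (h : ∀ x ∈ l, f x = g x) : l.all f = l.all g := by
  induction l with
  | nil => rfl
  | cons x t ih =>
    simp only [List.all_cons]
    rw [h x List.mem_cons_self, ih (fun y hy => h y (List.mem_cons_of_mem _ hy))]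

theorem gd_le_gd {l : List Int} (hs : l.Pairwise (· ≤ ·)) {i j : Nat}
    (hij : i ≤ j) (hj : j < l.length) : gd l i ≤ gd l j := by
  rcases Nat.eq_or_lt_of_le hij with h | h
  · subst h; exact le_refl _
  · rw [gd, gd, List.getD_eq_getElem _ _ (by omega), List.getD_eq_getElem _ _ hj]
    exact List.pairwise_iff_getElem.mp hs i j (by omega) hj h

theorem pairwise_of_chain {l : List Int}
    (h : ∀ i, i + 1 < l.length → gd l i ≤ gd l (i+1)) : l.Pairwise (· ≤ ·) := by
  rw [List.pairwise_iff_getElem]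
  intro i j hi hj hij
  induction j with
  | zero => omega
  | succ m ih =>
    have hm : m < l.length := by omega
    have hstep : l[m] ≤ l[m+1] := by
      have := h m hj
      rwa [gd, gd, List.getD_eq_getElem _ _ hm, List.getD_eq_getElem _ _ hj] at this
    rcases Nat.lt_succ_iff_lt_or_eq.mp hij with h' | h'
    · exact le_trans (ih hm h') hstep
    · subst h'; exact hstep

theorem two_le_countP {α : Type} {l : List α} {p : α → Bool} {a b : α}
    (ha : a ∈ l) (hb : b ∈ l) (hab : a ≠ b) (hpa : p a = true) (hpb : p b = true) :
    2 ≤ l.countP p := by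
  induction l with
  | nil => simp at ha
  | cons x t ih =>
    rw [List.countP_cons]
    rcases List.mem_cons.mp ha with hax | hat
    · subst hax
      have hbt : b ∈ t := by
        rcases List.mem_cons.mp hb with h | h
        · exact absurd h.symm hab
        · exact h
      have : 0 < t.countP p := List.countP_pos_iff.mpr ⟨b, hbt, hpb⟩
      rw [if_pos hpa]; omega
    · rcases List.mem_cons.mp hb with hbx | hbt
      · subst hbx
        have : 0 < t.countP p := List.countP_pos_iff.mpr ⟨a, hat, hpa⟩
        rw [if_pos hpb]; omega
      · have := ih hat hbt
        omega

theorem countP_le_one_of_unique {α : Type} {l : List α} {p : α → Bool} {c : α}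
    (hn : l.Nodup) (h : ∀ x ∈ l, p x = true → x = c) : l.countP p ≤ 1 := by
  induction l with
  | nil => simp
  | cons x t ih =>
    rw [List.countP_cons]
    rcases List.nodup_cons.mp hn with ⟨hx, hnt⟩
    by_cases hpx : p x = true
    · have hxc : x = c := h x List.mem_cons_self hpx
      have : t.countP p = 0 := by
        rw [List.countP_eq_zero]
        intro y hy hpy
        have := h y (List.mem_cons_of_mem _ hy) hpy
        exact hx (by rw [hxc, ← this]; exact hy)
      simp [hpx, this]
    · have := ih hnt (fun y hy hpy => h y (List.mem_cons_of_mem _ hy) hpy)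
      simp [hpx]; omega

theorem gd_rotate (tar : List Int) {j i : Nat} (hj : j ≤ tar.length) (hi : i < tar.length) :
    gd (tar.rotate j) i =
      if i < tar.length - j then gd tar (j+i) else gd tar (i - (tar.length - j)) := by
  rw [List.rotate_eq_drop_append_take hj]
  have hdl : (List.drop j tar).length = tar.length - j := by simp
  split
  · next hlt =>
    rw [gd, gd, List.getD_eq_getElem _ _ (by simp; omega),
      List.getD_eq_getElem _ _ (by omega),
      List.getElem_append_left (by omega), List.getElem_drop]
  · next hge =>
    rw [gd, gd, List.getD_eq_getElem _ _ (by simp; omega),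
      List.getD_eq_getElem _ _ (by omega),
      List.getElem_append_right (by omega)]
    simp [List.getElem_take, hdl]

-- the heart: A's block test holds iff the block is a rotation of its sorted version
theorem blockPassA_iff_rot (sub tar : List Int) (hs : tar.Pairwise (· ≤ ·)) (hne : tar ≠ []) :
    blockPassA sub tar ↔ ∃ j, j < tar.length ∧ sub = tar.rotate j := by
  have hk1 : 1 ≤ tar.length := by
    cases tar with
    | nil => exact absurd rfl hne
    | cons x t => simp
  constructor
  · rintro ⟨hperm, hok, hcnt⟩
    have hls : sub.length = tar.length := hperm.length_eq
    by_cases hdesc : ∃ p, p < tar.length - 1 ∧ gd sub (p+1) < gd sub p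
    · obtain ⟨p, hp, hpd⟩ := hdesc
      obtain ⟨c1, c2, c3⟩ := hok p hp hpd
      have huniq : ∀ q, q < tar.length - 1 → q ≠ p → ¬ (gd sub (q+1) < gd sub q) := by
        intro q hq hqp hqd
        have h2 := two_le_countP (l := List.range (tar.length - 1)) (p := descB sub)
          (List.mem_range.mpr hq) (List.mem_range.mpr hp) hqp
          (by simp [descB, hqd]) (by simp [descB, hpd])
        omega
      have hp1 : p + 1 ≤ sub.length := by omega
      have hLsort : (sub.rotate (p+1)).Pairwise (· ≤ ·) := by
        apply pairwise_of_chain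
        intro i hi
        rw [List.length_rotate] at hi
        rw [gd_rotate sub hp1 (by omega), gd_rotate sub hp1 (by omega)]
        rcases lt_trichotomy (i+1) (sub.length - (p+1)) with hlt | heq | hgt
        · rw [if_pos (by omega), if_pos hlt]
          have h' : ¬ (gd sub ((p+1+i)+1) < gd sub (p+1+i)) :=
            huniq (p+1+i) (by omega) (by omega)
          rw [show p+1+(i+1) = (p+1+i)+1 from by ring]
          exact not_lt.mp h'
        · rw [if_pos (by omega), if_neg (by omega)]
          rw [show p+1+i = sub.length - 1 from by omega,
            show i+1 - (sub.length-(p+1)) = 0 from by omega]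
          exact c3
        · rw [if_neg (by omega), if_neg (by omega)]
          rw [show i+1 - (sub.length-(p+1)) = (i - (sub.length - (p+1))) + 1 from by omega]
          have h' : ¬ (gd sub ((i - (sub.length - (p+1)))+1) < gd sub (i - (sub.length - (p+1)))) :=
            huniq (i - (sub.length - (p+1))) (by omega) (by omega)
          exact not_lt.mp h'
      have hLtar : sub.rotate (p+1) = tar :=
        List.eq_of_perm_of_sorted (fun a b _ _ h1 h2 => le_antisymm h1 h2) hLsort hs
          ((sub.rotate_perm (p+1)).trans hperm)
      refine ⟨tar.length - (p+1), by omega, ?_⟩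
      rw [← hLtar, List.rotate_rotate, List.length_rotate,
        show (p+1) + (sub.length - (p+1)) = sub.length from by omega, List.rotate_length]
    · push_neg at hdesc
      have hsort : sub.Pairwise (· ≤ ·) := by
        apply pairwise_of_chain
        intro i hi
        exact hdesc i (by omega)
      have hst : sub = tar :=
        List.eq_of_perm_of_sorted (fun a b _ _ h1 h2 => le_antisymm h1 h2) hsort hs hperm
      exact ⟨0, by omega, by rw [hst, List.rotate_zero]⟩
  · rintro ⟨j, hj, rfl⟩
    have hjle : j ≤ tar.length := le_of_lt hj
    have hkey : ∀ i, i < tar.length - 1 →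
        gd (tar.rotate j) (i+1) < gd (tar.rotate j) i → i + 1 = tar.length - j ∧ 1 ≤ j := by
      intro i hi hid
      rw [gd_rotate tar hjle (by omega), gd_rotate tar hjle (by omega)] at hid
      by_cases h1 : i + 1 < tar.length - j
      · rw [if_pos h1, if_pos (by omega)] at hid
        have : gd tar (j+i) ≤ gd tar (j+(i+1)) := gd_le_gd hs (by omega) (by omega)
        omega
      · by_cases h2 : i < tar.length - j
        · exact ⟨by omega, by omega⟩
        · rw [if_neg h1, if_neg h2] at hid
          have : gd tar (i - (tar.length - j)) ≤ gd tar (i+1 - (tar.length - j)) :=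
            gd_le_gd hs (by omega) (by omega)
          omega
    refine ⟨tar.rotate_perm j, ?_, ?_⟩
    · intro i hi hid
      obtain ⟨hky, hj1⟩ := hkey i hi hid
      refine ⟨?_, ?_, ?_⟩
      · rw [gd_rotate tar hjle (by omega), if_pos (by omega),
          show j + i = tar.length - 1 from by omega]
      · rw [gd_rotate tar hjle (by omega), if_neg (by omega),
          show (i+1) - (tar.length - j) = 0 from by omega]
      · rw [List.length_rotate, gd_rotate tar hjle (by omega),
          gd_rotate tar hjle (by omega), if_neg (by omega), if_pos (by omega),
          show tar.length - 1 - (tar.length - j) = j - 1 from by omega]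
        exact gd_le_gd hs (by omega) (by omega)
    · apply countP_le_one_of_unique List.nodup_range (c := tar.length - j - 1)
      intro x hx hpx
      rw [List.mem_range] at hx
      rw [descB, decide_eq_true_eq] at hpx
      obtain ⟨hky, hj1⟩ := hkey x hx hpx
      omega

-- Counter equality is permutation
theorem pyDictEq_counter_iff (sub tar : List Int) :
    pyDictEq (PySem.Dict.counter sub) (PySem.Dict.counter tar) = true ↔ sub.Perm tar := by
  rw [pyDictEq, Bool.and_eq_true, List.all_eq_true, PySem.Dict.keys_counter,
    PySem.Dict.keys_counter]
  constructor
  · rintro ⟨hkeys, hvals⟩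
    have hmem : ∀ x : Int, x ∈ sub ↔ x ∈ tar := by
      intro x
      have := (PySem.Set.equal_iff _ _).mp hkeys x
      simpa [PySem.Set.mem_ofList] using this
    rw [List.perm_iff_count]
    intro a
    by_cases hmemA : a ∈ sub
    · have := hvals a ((PySem.Set.mem_ofList _ _).mpr hmemA)
      rw [PySem.Dict.getD_counter, PySem.Dict.getD_counter, beq_iff_eq] at this
      exact_mod_cast this
    · have hnt : a ∉ tar := fun h => hmemA ((hmem a).mpr h)
      rw [List.count_eq_zero.mpr hmemA, List.count_eq_zero.mpr hnt]
  · intro hp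
    refine ⟨(PySem.Set.equal_iff _ _).mpr ?_, ?_⟩
    · intro x
      simp [PySem.Set.mem_ofList, hp.mem_iff]
    · intro x hx
      rw [PySem.Dict.getD_counter, PySem.Dict.getD_counter, beq_iff_eq]
      exact_mod_cast List.perm_iff_count.mp hp x

-- the inner loop, run on any index list, counts descents and fails at a bad one
theorem checkInnerA_eq (sub tar : List Int) (dc : Int) (is : List Int) :
    checkInnerA sub tar dc is =
      if is.all (fun i => !(decide (PySem.List.pyGetD sub (i+1) 0 < PySem.List.pyGetD sub i 0))
            || (PySem.List.pyGetD sub i 0 == PySem.List.pyGetD tar (-1) 0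
                && PySem.List.pyGetD sub (i+1) 0 == PySem.List.pyGetD tar 0 0
                && decide (PySem.List.pyGetD sub (-1) 0 ≤ PySem.List.pyGetD sub 0 0)))
      then some (dc + (is.countP (fun i => decide (PySem.List.pyGetD sub (i+1) 0 < PySem.List.pyGetD sub i 0)) : Int))
      else none := by
  induction is generalizing dc with
  | nil => simp [checkInnerA]
  | cons i rest ih =>
    rw [checkInnerA]
    by_cases hd : PySem.List.pyGetD sub (i+1) 0 < PySem.List.pyGetD sub i 0
    · rw [if_pos hd]
      by_cases hc : (PySem.List.pyGetD sub i 0 == PySem.List.pyGetD tar (-1) 0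
          && PySem.List.pyGetD sub (i+1) 0 == PySem.List.pyGetD tar 0 0
          && decide (PySem.List.pyGetD sub (-1) 0 ≤ PySem.List.pyGetD sub 0 0)) = true
      · rw [if_pos hc, ih]
        simp only [List.all_cons, List.countP_cons, hc, hd, decide_true, Bool.not_true,
          Bool.false_or, Bool.true_and, if_pos]
        split
        · congr 1
          push_cast
          ring
        · rfl
      · rw [if_neg hc]
        simp [List.all_cons, hd, hc]
    · rw [if_neg hd, ih]
      simp only [List.all_cons, List.countP_cons, hd, decide_false, Bool.not_false,
        Bool.true_or, Bool.true_and, if_neg, add_zero]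
      rfl

-- A's whole per-block bool equals blockPassA
theorem blockA_iff (sub tar : List Int) {k : Nat} (hk : 1 ≤ k)
    (hls : sub.length = k) (hlt : tar.length = k) :
    (pyDictEq (PySem.Dict.counter sub) (PySem.Dict.counter tar)
      && match checkInnerA sub tar 0 (PySem.List.pyRange 0 ((k:Int)-1) 1) with
         | none => false
         | some dc => !(decide (1 < dc))) = true ↔ blockPassA sub tar := by
  subst hlt
  have hls1 : 1 ≤ sub.length := by omega
  have e1 : PySem.List.pyGetD tar (-1) 0 = gd tar (tar.length - 1) := by
    have h := PySem.List.pyGetD_neg_natCast tar 1 0 (by omega) (by omega)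
    rw [gd, List.getD_eq_getElem _ _ (by omega)]
    simpa using h
  have e3 : PySem.List.pyGetD sub (-1) 0 = gd sub (sub.length - 1) := by
    have h := PySem.List.pyGetD_neg_natCast sub 1 0 (by omega) (by omega)
    rw [gd, List.getD_eq_getElem _ _ (by omega)]
    simpa using h
  have e2 : PySem.List.pyGetD tar (0:Int) 0 = gd tar 0 := by
    have h := PySem.List.pyGetD_natCast tar 0 0
    simpa using h
  have e4 : PySem.List.pyGetD sub (0:Int) 0 = gd sub 0 := by
    have h := PySem.List.pyGetD_natCast sub 0 0
    simpa using h
  have hrange : PySem.List.pyRange 0 ((tar.length:Int)-1) 1 =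
      (List.range (tar.length-1)).map (Nat.cast : Nat → Int) := by
    rw [PySem.List.pyRange_one,
      show (((tar.length:Int)-1) - 0).toNat = tar.length - 1 from by omega]
    simp
  rw [Bool.and_eq_true, pyDictEq_counter_iff, checkInnerA_eq, hrange, List.all_map,
    List.countP_map]
  have hfun : ∀ m : Nat,
      ((fun i : Int => !(decide (PySem.List.pyGetD sub (i+1) 0 < PySem.List.pyGetD sub i 0))
          || (PySem.List.pyGetD sub i 0 == PySem.List.pyGetD tar (-1) 0
              && PySem.List.pyGetD sub (i+1) 0 == PySem.List.pyGetD tar 0 0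
              && decide (PySem.List.pyGetD sub (-1) 0 ≤ PySem.List.pyGetD sub 0 0)))
        ∘ (Nat.cast : Nat → Int)) m = okB sub tar m := by
    intro m
    simp only [Function.comp_apply]
    rw [show ((m:Int) + 1) = (((m+1 : Nat)) : Int) from by push_cast; ring]
    rw [PySem.List.pyGetD_natCast, PySem.List.pyGetD_natCast, e1, e2, e3, e4]
    rw [Bool.eq_iff_iff]
    simp only [Bool.or_eq_true, Bool.not_eq_true, decide_eq_false_iff_not, Bool.and_eq_true,
      beq_iff_eq, decide_eq_true_eq, okB, descB, Bool.not_eq_true', gd]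
  have hdfun : ∀ m : Nat,
      ((fun i : Int => decide (PySem.List.pyGetD sub (i+1) 0 < PySem.List.pyGetD sub i 0))
        ∘ (Nat.cast : Nat → Int)) m = descB sub m := by
    intro m
    simp only [Function.comp_apply]
    rw [show ((m:Int) + 1) = (((m+1 : Nat)) : Int) from by push_cast; ring]
    rw [PySem.List.pyGetD_natCast, PySem.List.pyGetD_natCast]
    rfl
  rw [all_congr_mem (fun x _ => hfun x), List.countP_congr (fun x _ => by rw [hdfun x])]
  by_cases hall : (List.range (tar.length-1)).all (okB sub tar) = true
  · rw [if_pos hall]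
    constructor
    · rintro ⟨hp, hm⟩
      refine ⟨hp, ?_, ?_⟩
      · intro i hi
        exact (okB_iff sub tar i).mp (List.all_eq_true.mp hall _ (List.mem_range.mpr hi))
      · have h : (!(decide ((1:Int) < 0 +
            (((List.range (tar.length-1)).countP (descB sub) : Nat) : Int)))) = true := hm
        simp only [Bool.not_eq_true', decide_eq_false_iff_not, not_lt] at h
        push_cast at h
        omega
    · rintro ⟨hp, hok, hcnt⟩
      refine ⟨hp, ?_⟩
      show (!(decide ((1:Int) < 0 +
          (((List.range (tar.length-1)).countP (descB sub) : Nat) : Int)))) = true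
      simp only [Bool.not_eq_true', decide_eq_false_iff_not, not_lt]
      push_cast
      omega
  · rw [if_neg hall]
    constructor
    · rintro ⟨_, h⟩
      exact absurd h (by simp)
    · rintro ⟨hp, hok, hcnt⟩
      exact absurd (List.all_eq_true.mpr
        (fun m hm => (okB_iff sub tar m).mpr (hok m (List.mem_range.mp hm)))) hall

-- a length-k window of tar ++ tar is a rotation
theorem window_eq_rotate (tar : List Int) {m : Nat} (hm : m ≤ tar.length) :
    (List.drop m (tar ++ tar)).take tar.length = tar.rotate m := by
  rw [List.drop_append_of_le_length hm, List.take_append, List.rotate_eq_drop_append_take hm]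
  have h1 : (List.drop m tar).length = tar.length - m := by simp
  rw [List.take_of_length_le (by omega)]
  have h2 : tar.length - (List.drop m tar).length = m := by omega
  rw [h2]

-- B's per-block bool
theorem blockB_iff (sub tar : List Int) {k : Nat} (hlt : tar.length = k) :
    rotOkB sub tar (k:Int) = true ↔ ∃ j, j < k ∧ sub = tar.rotate j := by
  subst hlt
  rw [rotOkB, PySem.List.pyRange_one,
    show (((tar.length:Int)) - 0).toNat = tar.length from by omega]
  have hc : (List.map (fun n : Nat => (0:Int) + ↑n) (List.range tar.length))
      = (List.range tar.length).map (Nat.cast : Nat → Int) := by simp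
  rw [hc, List.any_map, List.any_eq_true]
  constructor
  · rintro ⟨m, hm, hb⟩
    rw [List.mem_range] at hm
    simp only [Function.comp_apply, beq_iff_eq] at hb
    rw [PySem.List.slice_natCast_add, window_eq_rotate tar (le_of_lt hm)] at hb
    exact ⟨m, hm, hb.symm⟩
  · rintro ⟨j, hj, hsub⟩
    refine ⟨j, List.mem_range.mpr hj, ?_⟩
    simp only [Function.comp_apply, beq_iff_eq]
    rw [PySem.List.slice_natCast_add, window_eq_rotate tar (le_of_lt hj), hsub]

-- checkBlocksA is an 'all' over the block starts
theorem checkBlocksA_eq_all (nums sortedLs : List Int) (k : Int) (is : List Int) :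
    checkBlocksA nums sortedLs k is = is.all (fun i =>
      let sub := PySem.List.slice nums (some i) (some (i+k))
      let tar := PySem.List.slice sortedLs (some i) (some (i+k))
      pyDictEq (PySem.Dict.counter sub) (PySem.Dict.counter tar)
        && match checkInnerA sub tar 0 (PySem.List.pyRange 0 (k-1) 1) with
           | none => false
           | some dc => !(decide (1 < dc))) := by
  induction is with
  | nil => simp [checkBlocksA]
  | cons i rest ih =>
    rw [checkBlocksA, List.all_cons, ← ih]
    by_cases hdict : pyDictEq
        (PySem.Dict.counter (PySem.List.slice nums (some i) (some (i+k))))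
        (PySem.Dict.counter (PySem.List.slice sortedLs (some i) (some (i+k)))) = true
    · rcases hm : checkInnerA (PySem.List.slice nums (some i) (some (i+k)))
          (PySem.List.slice sortedLs (some i) (some (i+k))) 0
          (PySem.List.pyRange 0 (k-1) 1) with _ | dc
      · simp [hdict, hm]
      · by_cases hdc : 1 < dc
        · simp [hdict, hm, hdc]
        · simp [hdict, hm, hdc]
    · rw [Bool.not_eq_true] at hdict
      simp [hdict]

-- per-divisor agreement on real slices
theorem check_eq (nums : List Int) (k : Int) (hk : 1 ≤ k) (hdvd : k ∣ (nums.length : Int)) :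
    checkBlocksA nums (PySem.List.sorted nums (fun x => x) false) k
        (PySem.List.pyRange 0 (nums.length : Int) k)
      = blocksOkB nums (PySem.List.sorted nums (fun x => x) false) k := by
  rw [checkBlocksA_eq_all, blocksOkB]
  simp only [PySem.List.len_eq]
  apply all_congr_mem
  intro i hi
  rw [PySem.List.mem_pyRange_iff_of_pos (by omega)] at hi
  obtain ⟨h0, hin, hdv⟩ := hi
  rw [sub_zero] at hdv
  have hik : i + k ≤ (nums.length : Int) := by
    obtain ⟨a, ha⟩ := hdv
    obtain ⟨b, hb⟩ := hdvd
    have ha0 : 0 ≤ a := by nlinarith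
    have hab : a < b := by nlinarith
    have : k * (a + 1) ≤ k * b := by
      apply mul_le_mul_of_nonneg_left (by omega) (by omega)
    rw [ha, hb]
    linarith
  have hi' : i = (i.toNat : Int) := by omega
  have hk' : k = (k.toNat : Int) := by omega
  rw [hi', hk']
  rw [PySem.List.slice_natCast_add, PySem.List.slice_natCast_add]
  have hslen : (PySem.List.sorted nums (fun x => x) false).length = nums.length :=
    (PySem.List.sorted_perm nums (fun x => x) false).length_eq
  have hsub_len : ((nums.drop i.toNat).take k.toNat).length = k.toNat := by
    simp
    omega
  have htar_len : (((PySem.List.sorted nums (fun x => x) false).drop i.toNat).take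
      k.toNat).length = k.toNat := by
    simp [hslen]
    omega
  have hsort : (((PySem.List.sorted nums (fun x => x) false).drop i.toNat).take
      k.toNat).Pairwise (· ≤ ·) := by
    have hps : (PySem.List.sorted nums (fun x => x) false).Pairwise (· ≤ ·) :=
      PySem.List.sorted_pairwise nums (fun x => x)
    exact List.Pairwise.sublist
      ((List.take_sublist _ _).trans (List.drop_sublist _ _)) hps
  have hne : ((PySem.List.sorted nums (fun x => x) false).drop i.toNat).take k.toNat ≠ [] := by
    intro h
    rw [h] at htar_len
    simp at htar_len
    omega
  rw [Bool.eq_iff_iff, blockA_iff _ _ (by omega) hsub_len htar_len,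
    blockPassA_iff_rot _ _ hsort hne, htar_len, blockB_iff _ _ htar_len]

-- ===== VERDICT (by name: the statement is the Claim_ definition above) =====
theorem sortableIntegers_spec : Claim_equal_sortableIntegers := by
  intro nums _
  show sortableIntegers nums = sortableIntegers_alt nums
  simp only [sortableIntegers, sortableIntegers_alt, PySem.List.len_eq]
  apply PySem.List.foldl_congr_mem
  intro ans x hx
  rw [PySem.List.mem_pyRange_one] at hx
  by_cases hmod : PySem.Int.mod (↑nums.length) x = 0
  · have hdvd := (PySem.Int.mod_eq_zero_iff_dvd (↑nums.length) x).mp hmod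
    have h1 : (PySem.Int.mod (↑nums.length) x == 0) = true := by simp [hmod]
    have h2 : (PySem.Int.mod (↑nums.length) x != 0) = false := by simp [hmod]
    simp only [h1, h2, if_true, Bool.false_eq_true, if_false]
    simp only [check_eq nums x (by omega) hdvd]
  · have h1 : (PySem.Int.mod (↑nums.length) x == 0) = false := by simp [hmod]
    have h2 : (PySem.Int.mod (↑nums.length) x != 0) = true := by simp [hmod]
    simp only [h1, h2, if_true, Bool.false_eq_true, if_false]
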